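-- pv_equiv track=rewrite | github.com/xMakuno/ICPC-training | Codeforces/QueueAtTheSchool.py | swapKids
-- ===== SOURCE A (Python) =====
-- def swapKids(ans):
--     boysToSwap = []
--     for idx, letter in enumerate(ans):
--         if(idx <= len(ans)-2):
--             if(letter == "B" and ans[idx+1] == "G"):
--                 boysToSwap.append(idx)
--     for boy in boysToSwap:
--         ans[boy] = "G"
--         ans[boy+1] = "B"
--     return ans
-- ===== SOURCE B (Python) =====
-- def swapKids(ans):
--     i = 0
--     while i < len(ans) - 1:
--         if ans[i] == "B" and ans[i + 1] == "G":
--             ans[i] = "G"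
--             ans[i + 1] = "B"
--             i += 2
--         else:
--             i += 1
--     return ans
-- ===== Notes on version B (the rewrite author's own statement) =====
-- stated objective: simpler
-- what changed: Replaced the two-pass collect-indices-then-swap structure with a single in-place scan that swaps BG pairs as it goes, skipping two positions after each swap.
import Mathlib
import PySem

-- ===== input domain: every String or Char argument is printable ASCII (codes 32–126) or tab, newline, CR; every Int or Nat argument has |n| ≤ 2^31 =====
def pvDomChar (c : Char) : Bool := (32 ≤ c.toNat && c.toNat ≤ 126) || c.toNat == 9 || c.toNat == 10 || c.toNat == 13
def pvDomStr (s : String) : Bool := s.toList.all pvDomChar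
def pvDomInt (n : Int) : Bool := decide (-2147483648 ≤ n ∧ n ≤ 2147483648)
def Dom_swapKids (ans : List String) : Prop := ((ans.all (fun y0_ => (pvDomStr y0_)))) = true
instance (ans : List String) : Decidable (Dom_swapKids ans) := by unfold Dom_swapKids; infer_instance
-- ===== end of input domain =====

-- B replaces A's two-pass collect-then-swap with one in-place scan (swap and skip two); simpler, same cost.


-- ===== PORT A =====
-- first pass of A: collect the indices idx with ans[idx] == "B" and ans[idx+1] == "G"
def collectSwaps (ans : List String) : List Int :=
  (PySem.List.enumerate ans 0).foldl
    (fun acc p =>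
      if p.1 ≤ (ans.length : Int) - 2 then
        if p.2 = "B" ∧ PySem.List.pyGetD ans (p.1 + 1) "" = "G" then acc ++ [p.1] else acc
      else acc) []

def swapKids (ans : List String) : List String :=
  (collectSwaps ans).foldl
    (fun l boy => PySem.List.pySetD (PySem.List.pySetD l boy "G") (boy + 1) "B") ans

-- ===== PORT B =====
-- the while loop of Source B: scan with index i, swap a "B","G" pair in place and skip two
def swapKidsLoop (ans : List String) (i : Nat) : List String :=
  if i + 1 < ans.length then
    if ans.getD i "" = "B" ∧ ans.getD (i + 1) "" = "G" then
      swapKidsLoop ((ans.set i "G").set (i + 1) "B") (i + 2)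
    else
      swapKidsLoop ans (i + 1)
  else ans
termination_by ans.length - i
decreasing_by all_goals simp_all [List.length_set]; omega

def swapKids_alt (ans : List String) : List String := swapKidsLoop ans 0

-- ===== PRECONDITION & SPEC =====
def Spec_swapKids (ans : List String) (out : List String) : Prop := out = swapKids_alt ans
instance (ans : List String) (out : List String) : Decidable (Spec_swapKids ans out) := by unfold Spec_swapKids; infer_instance

-- ===== CLAIM (what is proved, stated in full; the proofs are below) =====
def Claim_equal_swapKids : Prop := ∀ (ans : List String), Dom_swapKids ans → Spec_swapKids ans (swapKids ans)

-- ===== LEMMAS AND PROOFS =====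

-- canonical description of one round: swap each disjoint "B","G" pair
def oneRound : List String → List String
  | [] => []
  | [x] => [x]
  | x :: y :: r =>
    if x = "B" ∧ y = "G" then "G" :: "B" :: oneRound r else x :: oneRound (y :: r)

-- enumerate with shifted start
theorem enumerate_shift {α : Type} (l : List α) (s : Int) :
    PySem.List.enumerate l (s + 1) = (PySem.List.enumerate l s).map (fun p => (p.1 + 1, p.2)) := by
  induction l generalizing s with
  | nil => simp [PySem.List.enumerate]
  | cons x r ih => simp [PySem.List.enumerate_cons, ih]

-- A's first pass as a filter over enumerate
theorem collectSwaps_filter (ans l : List String) :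
    (PySem.List.enumerate l 0).foldl
      (fun acc p =>
        if p.1 ≤ (ans.length : Int) - 2 then
          if p.2 = "B" ∧ PySem.List.pyGetD ans (p.1 + 1) "" = "G" then acc ++ [p.1] else acc
        else acc) []
    = ((PySem.List.enumerate l 0).filter
        (fun p => decide (p.1 ≤ (ans.length : Int) - 2 ∧ p.2 = "B" ∧ PySem.List.pyGetD ans (p.1 + 1) "" = "G"))).map (·.1) := by
  have hbody :
      (fun (acc : List Int) (p : Int × String) =>
        if p.1 ≤ (ans.length : Int) - 2 then
          if p.2 = "B" ∧ PySem.List.pyGetD ans (p.1 + 1) "" = "G" then acc ++ [p.1] else acc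
        else acc)
      = (fun acc p =>
          if (decide (p.1 ≤ (ans.length : Int) - 2 ∧ p.2 = "B" ∧ PySem.List.pyGetD ans (p.1 + 1) "" = "G")) = true
          then acc ++ [p.1] else acc) := by
    funext acc p
    by_cases h1 : p.1 ≤ (ans.length : Int) - 2 <;>
      by_cases h2 : p.2 = "B" ∧ PySem.List.pyGetD ans (p.1 + 1) "" = "G" <;>
      simp [h1, h2]
  rw [hbody]
  exact PySem.List.foldl_append_if _ _ _ []

-- A's first pass, unfolded one element
theorem collectSwaps_cons (x : String) (r : List String) :
    collectSwaps (x :: r) =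
      (if 1 ≤ r.length ∧ x = "B" ∧ r.getD 0 "" = "G" then [(0 : Int)] else [])
        ++ (collectSwaps r).map (· + 1) := by
  unfold collectSwaps
  rw [collectSwaps_filter (x :: r) (x :: r), collectSwaps_filter r r,
      PySem.List.enumerate_cons, enumerate_shift, List.filter_cons, List.filter_map]
  have hcong :
      List.filter ((fun p : Int × String => decide (p.1 ≤ ((x :: r).length : Int) - 2 ∧ p.2 = "B" ∧ PySem.List.pyGetD (x :: r) (p.1 + 1) "" = "G")) ∘ (fun p : Int × String => (p.1 + 1, p.2))) (PySem.List.enumerate r 0)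
      = List.filter (fun p : Int × String => decide (p.1 ≤ (r.length : Int) - 2 ∧ p.2 = "B" ∧ PySem.List.pyGetD r (p.1 + 1) "" = "G")) (PySem.List.enumerate r 0) := by
    apply List.filter_congr
    intro p hp
    rcases (PySem.List.mem_enumerate_iff r 0 p).mp hp with ⟨k, hk, rfl⟩
    simp only [Function.comp]
    have h1 : ((0 : Int) + (k : Int)) + 1 + 1 = ((k + 2 : Nat) : Int) := by omega
    have h2 : ((0 : Int) + (k : Int)) + 1 = ((k + 1 : Nat) : Int) := by omega
    have h3 : PySem.List.pyGetD (x :: r) (((0 : Int) + (k : Int)) + 1 + 1) ""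
        = PySem.List.pyGetD r (((0 : Int) + (k : Int)) + 1) "" := by
      rw [h1, h2, PySem.List.pyGetD_natCast, PySem.List.pyGetD_natCast]
      rfl
    have h4 : ((0 : Int) + (k : Int) + 1 ≤ ((x :: r).length : Int) - 2)
        ↔ ((0 : Int) + (k : Int) ≤ (r.length : Int) - 2) := by
      simp only [List.length_cons]; omega
    simp only [h3, h4]
  rw [hcong]
  have hget1 : PySem.List.pyGetD (x :: r) ((0 : Int) + 1) "" = r.getD 0 "" := by
    rw [show ((0 : Int) + 1) = ((1 : Nat) : Int) by omega, PySem.List.pyGetD_natCast]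
    rfl
  by_cases h : 1 ≤ r.length ∧ x = "B" ∧ r.getD 0 "" = "G"
  · rw [if_pos (decide_eq_true (show (((0 : Int), x).1 ≤ ((x :: r).length : Int) - 2 ∧ ((0 : Int), x).2 = "B" ∧ PySem.List.pyGetD (x :: r) (((0 : Int), x).1 + 1) "" = "G") from
      ⟨by simp only [List.length_cons]; omega, h.2.1, by show PySem.List.pyGetD (x :: r) ((0 : Int) + 1) "" = "G"; rw [hget1]; exact h.2.2⟩)), if_pos h]
    simp [List.map_map, Function.comp]
  · rw [if_neg (by
      simp only [decide_eq_true_eq]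
      rintro ⟨ha, hb, hc⟩
      apply h
      refine ⟨by simp only [List.length_cons] at ha; omega, hb, ?_⟩
      rw [← hget1]
      exact hc), if_neg h]
    simp [List.map_map, Function.comp]

-- all collected indices are nonnegative
theorem collectSwaps_nonneg (ans : List String) : ∀ i ∈ collectSwaps ans, 0 ≤ i := by
  induction ans with
  | nil => simp [collectSwaps, PySem.List.enumerate]
  | cons x r ih =>
    intro i hi
    rw [collectSwaps_cons] at hi
    rcases List.mem_append.mp hi with h | h
    · split_ifs at h <;> simp_all
    · rcases List.mem_map.mp h with ⟨j, hj, rfl⟩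
      have := ih j hj; omega

-- A's second pass over shifted indices acts under the head
theorem foldl_setpair_shift (x : String) :
    ∀ (ids : List Int) (l : List String), (∀ i ∈ ids, 0 ≤ i) →
    (ids.map (· + 1)).foldl
        (fun l boy => PySem.List.pySetD (PySem.List.pySetD l boy "G") (boy + 1) "B") (x :: l)
      = x :: ids.foldl
        (fun l boy => PySem.List.pySetD (PySem.List.pySetD l boy "G") (boy + 1) "B") l := by
  intro ids
  induction ids with
  | nil => simp
  | cons i rest ih =>
    intro l h
    have hi : 0 ≤ i := h i (by simp)
    simp only [List.map_cons, List.foldl_cons]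
    rw [PySem.List.pySetD_of_nonneg _ _ (by omega),
        PySem.List.pySetD_of_nonneg _ _ (by omega),
        PySem.List.pySetD_of_nonneg _ _ hi,
        PySem.List.pySetD_of_nonneg _ _ (by omega)]
    have h1 : (i + 1).toNat = i.toNat + 1 := by omega
    have h2 : (i + 1 + 1).toNat = (i + 1).toNat + 1 := by omega
    rw [h1, h2, h1, List.set_cons_succ, List.set_cons_succ]
    exact ih _ (fun j hj => h j (by simp [hj]))

-- A equals the canonical round
theorem swapKids_eq_oneRound (ans : List String) : swapKids ans = oneRound ans := by
  have H : ∀ n (l : List String), l.length ≤ n → swapKids l = oneRound l := by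
    intro n
    induction n with
    | zero =>
      intro l hl
      have : l = [] := List.length_eq_zero_iff.mp (Nat.le_zero.mp hl)
      subst this
      simp [swapKids, collectSwaps, PySem.List.enumerate, oneRound]
    | succ n ih =>
      intro l hl
      match l with
      | [] => simp [swapKids, collectSwaps, PySem.List.enumerate, oneRound]
      | [x] =>
        simp [swapKids, collectSwaps, PySem.List.enumerate, oneRound]
      | x :: y :: r =>
        by_cases hg : x = "B" ∧ y = "G"
        · obtain ⟨rfl, rfl⟩ := hg
          have hc : collectSwaps ("B" :: "G" :: r) = 0 :: ((collectSwaps r).map (· + 1)).map (· + 1) := by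
            rw [collectSwaps_cons, collectSwaps_cons]
            rw [if_pos (by simp), if_neg (by simp)]
            simp
          unfold swapKids
          rw [hc]
          simp only [List.foldl_cons]
          have hset : (PySem.List.pySetD (PySem.List.pySetD ("B" :: "G" :: r) 0 "G") (0 + 1) "B")
              = "G" :: "B" :: r := by
            rw [PySem.List.pySetD_of_nonneg _ _ (by omega), PySem.List.pySetD_of_nonneg _ _ (by omega)]
            rfl
          rw [hset]
          rw [foldl_setpair_shift "G" _ _ (by
            intro i hi
            rcases List.mem_map.mp hi with ⟨j, hj, rfl⟩
            have := collectSwaps_nonneg r j hj; omega)]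
          rw [foldl_setpair_shift "B" _ _ (collectSwaps_nonneg r)]
          have hr : swapKids r = oneRound r := ih r (by simp at hl; omega)
          unfold swapKids at hr
          rw [hr]
          simp [oneRound]
        · have hc : collectSwaps (x :: y :: r) = (collectSwaps (y :: r)).map (· + 1) := by
            rw [collectSwaps_cons]
            rw [if_neg (by
              simp only [List.length_cons, List.getD_cons_zero]
              rintro ⟨_, h2, h3⟩; exact hg ⟨h2, h3⟩)]
            simp
          unfold swapKids
          rw [hc, foldl_setpair_shift x _ _ (collectSwaps_nonneg (y :: r))]
          have hr : swapKids (y :: r) = oneRound (y :: r) := ih (y :: r) (by simp at hl ⊢; omega)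
          unfold swapKids at hr
          rw [hr]
          simp only [oneRound]
          rw [if_neg hg]
  exact H ans.length ans (Nat.le_refl _)

-- B's loop at i+1 leaves the head alone
theorem swapKidsLoop_shift (x : String) (l : List String) (i : Nat) :
    swapKidsLoop (x :: l) (i + 1) = x :: swapKidsLoop l i := by
  conv =>
    lhs
    rw [swapKidsLoop]
  conv =>
    rhs
    rw [swapKidsLoop]
  by_cases h : i + 1 < l.length
  · rw [if_pos h, if_pos (show i + 1 + 1 < (x :: l).length by simp only [List.length_cons]; omega)]
    have e1 : (x :: l).getD (i + 1) "" = l.getD i "" := List.getD_cons_succ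
    have e2 : (x :: l).getD (i + 1 + 1) "" = l.getD (i + 1) "" := List.getD_cons_succ
    rw [e1, e2]
    by_cases hg : l.getD i "" = "B" ∧ l.getD (i + 1) "" = "G"
    · rw [if_pos hg, if_pos hg]
      rw [List.set_cons_succ, List.set_cons_succ]
      have e3 : i + 1 + 2 = (i + 2) + 1 := by omega
      rw [e3]
      exact swapKidsLoop_shift x _ (i + 2)
    · rw [if_neg hg, if_neg hg]
      exact swapKidsLoop_shift x l (i + 1)
  · rw [if_neg h, if_neg (show ¬ (i + 1 + 1 < (x :: l).length) by simp only [List.length_cons]; omega)]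
termination_by l.length - i
decreasing_by all_goals first
  | omega
  | (simp [List.length_set]; omega)

-- B equals the canonical round
theorem swapKids_alt_eq_oneRound (ans : List String) : swapKids_alt ans = oneRound ans := by
  have H : ∀ n (l : List String), l.length ≤ n → swapKidsLoop l 0 = oneRound l := by
    intro n
    induction n with
    | zero =>
      intro l hl
      have : l = [] := List.length_eq_zero_iff.mp (Nat.le_zero.mp hl)
      subst this; rw [swapKidsLoop]; simp [oneRound]
    | succ n ih =>
      intro l hl
      match l with
      | [] => rw [swapKidsLoop]; simp [oneRound]
      | [x] => rw [swapKidsLoop]; simp [oneRound]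
      | x :: y :: r =>
        rw [swapKidsLoop]
        rw [if_pos (show 0 + 1 < (x :: y :: r).length by simp)]
        have e1 : (x :: y :: r).getD 0 "" = x := List.getD_cons_zero
        have e2 : (x :: y :: r).getD (0 + 1) "" = y := List.getD_cons_succ
        rw [e1, e2]
        by_cases hg : x = "B" ∧ y = "G"
        · obtain ⟨rfl, rfl⟩ := hg
          rw [if_pos (by simp)]
          have hs : (("B" :: "G" :: r).set 0 "G").set (0 + 1) "B" = "G" :: "B" :: r := rfl
          rw [hs]
          have e3 : (0 + 2 : Nat) = (1 : Nat) + 1 := by omega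
          rw [e3, swapKidsLoop_shift]
          have e4 : (1 : Nat) = 0 + 1 := by omega
          rw [e4, swapKidsLoop_shift]
          rw [ih r (by simp at hl; omega)]
          simp [oneRound]
        · rw [if_neg hg]
          rw [swapKidsLoop_shift]
          rw [ih (y :: r) (by simp at hl ⊢; omega)]
          simp only [oneRound]
          rw [if_neg hg]
  exact H ans.length ans (Nat.le_refl _)

-- ===== VERDICT (by name: the statement is the Claim_ definition above) =====
theorem swapKids_spec : Claim_equal_swapKids := by
  intro ans _
  unfold Spec_swapKids
  rw [swapKids_eq_oneRound, swapKids_alt_eq_oneRound]
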